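-- pv_equiv track=rewrite | github.com/AI-Planning/planning-as-a-service | server/adaptor/parser_functions.py | find_parens
-- ===== SOURCE A (Python) =====
-- def find_parens(text_block, depth=1):
--     """
--     This function is going to return the index of the start "(" and close ")" at certain depth.
--     For example,((a)(b)) will return {0:7} if depth=1 and {1:3,4:6} if depth =2
--     :param text_block: text contain bracket
--     :param depth: which level of bracket are you intersted in
--     :return: dictionary contain the start and end index of bracket.
--     """
--     toret = {}
--     pstack = []
--
--     for i, token in enumerate(text_block):
--         if token == '(':
--             pstack.append(i)
--
--         elif token == ')':
--             if len(pstack) == 0: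
--                 raise IndexError("No matching closing parens at: " + str(i))
--             if len(pstack) == depth:
--                 toret[pstack.pop()] = i
--             else:
--                 pstack.pop()
--
--     if len(pstack) > 0:
--         raise IndexError("No matching opening parens at: " + str(pstack.pop()))
--
--     return toret
-- ===== SOURCE B (Python) =====
-- def find_parens(text_block, depth=1):
--     """Recursive-descent re-implementation: each '(' starts a recursive parse
--     of its group; a group records {open: close} when it closes at the target depth."""
--     toret = {}
--     n = len(text_block)
--
--     def group(open_index, level):
--         # parse the body of the group opened at open_index; return the index
--         # of its matching ')'
--         i = open_index + 1
--         while i < n: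
--             c = text_block[i]
--             if c == '(':
--                 i = group(i, level + 1) + 1
--             elif c == ')':
--                 if level == depth:
--                     toret[open_index] = i
--                 return i
--             else:
--                 i += 1
--         raise IndexError("No matching opening parens at: " + str(open_index))
--
--     i = 0
--     while i < n:
--         c = text_block[i]
--         if c == '(':
--             i = group(i, 1) + 1
--         elif c == ')':
--             raise IndexError("No matching closing parens at: " + str(i))
--         else:
--             i += 1
--     return toret
-- ===== Notes on version B (the rewrite author's own statement) =====
-- stated objective: alternative
-- what changed: Replaced the single-pass explicit paren stack with a recursive-descent parser: each '(' triggers a recursive call that consumes its whole group and records the open/close pair when that group's level equals the target depth.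
-- outside the precondition, e.g. on find_parens('(', 1): A raises IndexError, B raises IndexError
import Mathlib
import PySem

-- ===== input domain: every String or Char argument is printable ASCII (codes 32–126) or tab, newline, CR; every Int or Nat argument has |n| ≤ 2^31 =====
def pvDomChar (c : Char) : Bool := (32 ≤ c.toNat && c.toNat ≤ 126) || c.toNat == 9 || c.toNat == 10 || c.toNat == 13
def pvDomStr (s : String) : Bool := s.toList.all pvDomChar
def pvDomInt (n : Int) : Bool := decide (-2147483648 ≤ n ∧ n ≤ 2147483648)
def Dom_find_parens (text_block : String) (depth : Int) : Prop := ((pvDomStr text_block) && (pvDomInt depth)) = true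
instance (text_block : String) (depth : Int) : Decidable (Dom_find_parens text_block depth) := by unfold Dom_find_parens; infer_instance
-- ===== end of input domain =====

-- B replaces A's single pass with an explicit paren stack by a recursive-descent
-- parser (each '(' opens a recursive parse of its group); same value on balanced
-- input, which Pre_ states.

-- ===== PORT A =====
-- A's loop body; state = some (toret, pstack), none = an IndexError was raised.
def fpStepA (depth : Int) (st : Option (PySem.Dict Int Int × List Int)) (p : Int × Char) :
    Option (PySem.Dict Int Int × List Int) :=
  match st with
  | none => none
  | some (toret, pstack) =>
    if p.2 = '(' then some (toret, pstack ++ [p.1])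
    else if p.2 = ')' then
      if pstack.length = 0 then none
      else if (pstack.length : Int) = depth then
        some (toret.insert (pstack.getLast?.getD 0) p.1, pstack.dropLast)
      else some (toret, pstack.dropLast)
    else some (toret, pstack)

def find_parens (text_block : String) (depth : Int) : List (Int × Int) :=
  match (PySem.List.enumerate text_block.toList).foldl (fpStepA depth)
      (some ((PySem.Dict.empty : PySem.Dict Int Int), ([] : List Int))) with
  | none => []                               -- IndexError in the loop (outside Pre_)
  | some (toret, pstack) =>
    if pstack.length > 0 then []             -- final IndexError (outside Pre_)
    else toret.items

-- ===== PORT B =====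
-- B's `group`: parse the body of a group (xs = chars after the open paren, i = index
-- of xs.head, op = open index, lvl = level).  Returns none when the input ends
-- inside the group (an IndexError in Python), else the suffix after the matching
-- close paren, its index, and the updated dict; the suffix is packaged with the
-- length proof that makes the continuation recursion terminate.
def fpGroup (depth : Int) : (xs : List Char) → Int → Int → Int → PySem.Dict Int Int →
    Option {r : List Char × Int × PySem.Dict Int Int // r.1.length < xs.length}
  | [], _, _, _, _ => none
  | c :: rest, i, op, lvl, d =>
    if c = '(' then
      match fpGroup depth rest (i + 1) i (lvl + 1) d with
      | none => none
      | some ⟨(rest', j, d'), h⟩ =>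
        match fpGroup depth rest' (j + 1) op lvl d' with
        | none => none
        | some ⟨r, h2⟩ => some ⟨r, by
            have ha : rest'.length < rest.length := h
            have hb : r.1.length < rest'.length := h2
            simp only [List.length_cons]; omega⟩
    else if c = ')' then
      some ⟨(rest, i, if lvl = depth then d.insert op i else d), by simp⟩
    else
      match fpGroup depth rest (i + 1) op lvl d with
      | none => none
      | some ⟨r, h⟩ => some ⟨r, by
          have hb : r.1.length < rest.length := h
          simp only [List.length_cons]; omega⟩
termination_by xs => xs.length
decreasing_by
  · simp
  · have ha : rest'.length < rest.length := h
    simp only [List.length_cons]; omega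
  · simp

-- B's top-level scan; none = an IndexError was raised.
def fpTop (depth : Int) : (xs : List Char) → Int → PySem.Dict Int Int →
    Option (PySem.Dict Int Int)
  | [], _, d => some d
  | c :: rest, i, d =>
    if c = '(' then
      match fpGroup depth rest (i + 1) i 1 d with
      | none => none
      | some ⟨(rest', j, d'), hlt⟩ => fpTop depth rest' (j + 1) d'
    else if c = ')' then none
    else fpTop depth rest (i + 1) d
termination_by xs => xs.length
decreasing_by
  · have ha : rest'.length < rest.length := hlt
    simp only [List.length_cons]; omega
  · simp

def find_parens_alt (text_block : String) (depth : Int) : List (Int × Int) :=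
  match fpTop depth text_block.toList 0 (PySem.Dict.empty : PySem.Dict Int Int) with
  | none => []                               -- IndexError (outside Pre_)
  | some toret => toret.items

-- ===== PRECONDITION & SPEC =====
-- Pre_ excludes exactly the unbalanced strings, on which the Python A raises IndexError.
def Pre_find_parens (text_block : String) (depth : Int) : Prop :=
  (∀ n ≤ text_block.toList.length,
      (text_block.toList.take n).count ')' ≤ (text_block.toList.take n).count '(')
  ∧ text_block.toList.count ')' = text_block.toList.count '('
instance (text_block : String) (depth : Int) : Decidable (Pre_find_parens text_block depth) := by
  unfold Pre_find_parens; infer_instance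

def pvWitness_find_parens : String × Int := ("((a)(b))", 2)

def Spec_find_parens (text_block : String) (depth : Int) (out : List (Int × Int)) : Prop := out = find_parens_alt text_block depth
instance (text_block : String) (depth : Int) (out : List (Int × Int)) : Decidable (Spec_find_parens text_block depth out) := by unfold Spec_find_parens; infer_instance

-- ===== CLAIM (what is proved, stated in full; the proofs are below) =====
def Claim_equal_find_parens : Prop := ∀ (text_block : String) (depth : Int), Dom_find_parens text_block depth → Pre_find_parens text_block depth → Spec_find_parens text_block depth (find_parens text_block depth)

-- ===== LEMMAS AND PROOFS =====

lemma foldl_stepA_none (depth : Int) (ps : List (Int × Char)) :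
    ps.foldl (fpStepA depth) none = none := by
  induction ps with
  | nil => rfl
  | cons p ps ih => simpa [fpStepA] using ih

-- The group lemma: running A's fold over the enumeration of xs from state
-- (d, ops) (ops = the open-paren stack, whose last element is this group's open
-- index) matches what fpGroup computes.
lemma fpGroup_foldA (depth : Int) :
    ∀ (n : Nat) (xs : List Char), xs.length = n → ∀ (i op : Int) (ops : List Int)
      (d : PySem.Dict Int Int), ops ≠ [] → ops.getLast? = some op →
    (match fpGroup depth xs i op (ops.length : Int) d with
     | some ⟨(rest', j, d'), _⟩ =>
        (PySem.List.enumerate xs i).foldl (fpStepA depth) (some (d, ops)) =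
          (PySem.List.enumerate rest' (j + 1)).foldl (fpStepA depth) (some (d', ops.dropLast))
     | none =>
        ∃ d'' ops'', (PySem.List.enumerate xs i).foldl (fpStepA depth) (some (d, ops)) =
          some (d'', ops'') ∧ ops'' ≠ []) := by
  intro n
  induction n using Nat.strong_induction_on with
  | _ n ih =>
    intro xs hlen i op ops d hne hlast
    match xs with
    | [] =>
      simp only [fpGroup, PySem.List.enumerate_nil, List.foldl_nil]
      exact ⟨d, ops, rfl, hne⟩
    | c :: rest =>
      by_cases hovn : c = '('
      · -- push
        subst hovn
        have hstep : fpStepA depth (some (d, ops)) (i, '(') = some (d, ops ++ [i]) := by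
          simp [fpStepA]
        have hrec := ih rest.length (by simp at hlen; omega) rest rfl (i + 1) i (ops ++ [i]) d
          (by simp) (by simp)
        rw [show ((ops ++ [i]).length : Int) = (ops.length : Int) + 1 by simp] at hrec
        rcases hinner : fpGroup depth rest (i + 1) i ((ops.length : Int) + 1) d with _ | ⟨⟨⟨rest1, j1, d1⟩, h1⟩⟩
        · -- inner group never closes
          rw [hinner] at hrec
          obtain ⟨d'', ops'', hfold, hne''⟩ := hrec
          simp only [fpGroup, if_pos, hinner]
          simp only [PySem.List.enumerate_cons, List.foldl_cons, hstep]
          exact ⟨d'', ops'', hfold, hne''⟩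
        · rw [hinner] at hrec
          simp only [List.dropLast_concat] at hrec
          have h1' : rest1.length < rest.length := h1
          have hrec2 := ih rest1.length (by simp at hlen; omega) rest1 rfl (j1 + 1) op ops d1
            hne hlast
          rcases houter : fpGroup depth rest1 (j1 + 1) op (ops.length : Int) d1 with _ | ⟨⟨⟨rest2, j2, d2⟩, h2⟩⟩
          · rw [houter] at hrec2
            obtain ⟨d'', ops'', hfold, hne''⟩ := hrec2
            simp only [fpGroup, if_pos, hinner, houter]
            simp only [PySem.List.enumerate_cons, List.foldl_cons, hstep]
            exact ⟨d'', ops'', hrec ▸ hfold, hne''⟩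
          · rw [houter] at hrec2
            simp only [fpGroup, if_pos, hinner, houter]
            simp only [PySem.List.enumerate_cons, List.foldl_cons, hstep]
            rw [hrec]; exact hrec2
      · by_cases hcl : c = ')'
        · -- this group closes here
          subst hcl
          have hlz : ops.length ≠ 0 := fun h => hne (List.length_eq_zero_iff.mp h)
          have hstep : fpStepA depth (some (d, ops)) (i, ')') =
              some ((if (ops.length : Int) = depth then d.insert op i else d), ops.dropLast) := by
            by_cases hdep : (ops.length : Int) = depth
            · simp [fpStepA, hlz, hdep, hlast]
            · simp [fpStepA, hlz, hdep]
          simp only [fpGroup, if_neg (by decide : ¬ (')' : Char) = '('), if_pos]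
          simp only [PySem.List.enumerate_cons, List.foldl_cons, hstep]
        · -- ordinary character
          have hstep : fpStepA depth (some (d, ops)) (i, c) = some (d, ops) := by
            simp [fpStepA, hovn, hcl]
          have hrec := ih rest.length (by simp at hlen; omega) rest rfl (i + 1) op ops d hne hlast
          rcases hg : fpGroup depth rest (i + 1) op (ops.length : Int) d with _ | ⟨⟨⟨rest1, j1, d1⟩, h⟩⟩
          · rw [hg] at hrec
            simp only [fpGroup, if_neg hovn, if_neg hcl, hg]
            simp only [PySem.List.enumerate_cons, List.foldl_cons, hstep]
            exact hrec
          · rw [hg] at hrec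
            simp only [fpGroup, if_neg hovn, if_neg hcl, hg]
            simp only [PySem.List.enumerate_cons, List.foldl_cons, hstep]
            exact hrec

-- The top-level lemma.
lemma fpTop_foldA (depth : Int) :
    ∀ (n : Nat) (xs : List Char), xs.length = n → ∀ (i : Int) (d : PySem.Dict Int Int),
    (match fpTop depth xs i d with
     | some d' => (PySem.List.enumerate xs i).foldl (fpStepA depth) (some (d, [])) = some (d', [])
     | none =>
        (PySem.List.enumerate xs i).foldl (fpStepA depth) (some (d, [])) = none ∨
        ∃ d'' ops'', (PySem.List.enumerate xs i).foldl (fpStepA depth) (some (d, [])) =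
          some (d'', ops'') ∧ ops'' ≠ []) := by
  intro n
  induction n using Nat.strong_induction_on with
  | _ n ih =>
    intro xs hlen i d
    match xs with
    | [] => simp [fpTop]
    | c :: rest =>
      by_cases hovn : c = '('
      · subst hovn
        have hstep : fpStepA depth (some (d, ([] : List Int))) (i, '(') = some (d, [i]) := by
          simp [fpStepA]
        have hg := fpGroup_foldA depth rest.length rest rfl (i + 1) i [i] d (by simp) (by simp)
        rw [show (([i] : List Int).length : Int) = 1 by simp] at hg
        rcases hinner : fpGroup depth rest (i + 1) i 1 d with _ | ⟨⟨⟨rest1, j1, d1⟩, h1⟩⟩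
        · rw [hinner] at hg
          obtain ⟨d'', ops'', hfold, hne''⟩ := hg
          simp only [fpTop, if_pos, hinner]
          simp only [PySem.List.enumerate_cons, List.foldl_cons, hstep]
          exact Or.inr ⟨d'', ops'', hfold, hne''⟩
        · rw [hinner] at hg
          simp only [show ([i] : List Int).dropLast = [] from rfl] at hg
          have h1' : rest1.length < rest.length := h1
          have hrec := ih rest1.length (by simp at hlen; omega) rest1 rfl (j1 + 1) d1
          simp only [fpTop, if_pos, hinner]
          simp only [PySem.List.enumerate_cons, List.foldl_cons, hstep]
          rw [hg]
          exact hrec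
      · by_cases hcl : c = ')'
        · subst hcl
          have hstep : fpStepA depth (some (d, ([] : List Int))) (i, ')') = none := by
            simp [fpStepA]
          simp only [fpTop, if_neg (by decide : ¬ (')' : Char) = '('), if_pos]
          simp only [PySem.List.enumerate_cons, List.foldl_cons, hstep]
          exact Or.inl (foldl_stepA_none depth _)
        · have hstep : fpStepA depth (some (d, ([] : List Int))) (i, c) = some (d, []) := by
            simp [fpStepA, hovn, hcl]
          have hrec := ih rest.length (by simp at hlen; omega) rest rfl (i + 1) d
          simp only [fpTop, if_neg hovn, if_neg hcl]
          simp only [PySem.List.enumerate_cons, List.foldl_cons, hstep]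
          exact hrec

-- ===== VERDICT (by name: the statement is the Claim_ definition above) =====
theorem find_parens_spec : Claim_equal_find_parens := by
  intro text_block depth _ _
  unfold Spec_find_parens find_parens find_parens_alt
  have h := fpTop_foldA depth text_block.toList.length text_block.toList rfl 0
    (PySem.Dict.empty : PySem.Dict Int Int)
  rcases ht : fpTop depth text_block.toList 0 (PySem.Dict.empty : PySem.Dict Int Int) with _ | d'
  · rw [ht] at h
    rcases h with h | ⟨d'', ops'', hfold, hne''⟩
    · rw [show PySem.List.enumerate text_block.toList = PySem.List.enumerate text_block.toList 0 from rfl, h]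
    · rw [show PySem.List.enumerate text_block.toList = PySem.List.enumerate text_block.toList 0 from rfl, hfold]
      simp [List.length_pos_iff.mpr hne'']
  · rw [ht] at h
    rw [show PySem.List.enumerate text_block.toList = PySem.List.enumerate text_block.toList 0 from rfl, h]
    simp
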